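-- pv_equiv track=rewrite | github.com/Wolfyisdabest/NightPaw | services/rust_bridge.py | _classify_attachment_py
-- ===== SOURCE A (Python) =====
-- IMAGE_EXTENSIONS = {".png", ".jpg", ".jpeg", ".webp", ".gif", ".bmp"}
--
-- VIDEO_EXTENSIONS = {".mp4", ".mov", ".mkv", ".webm", ".avi", ".m4v"}
--
-- AUDIO_EXTENSIONS = {".mp3", ".wav", ".ogg", ".flac", ".m4a", ".aac"}
--
-- TEXT_EXTENSIONS = {
--     ".txt", ".md", ".py", ".json", ".yaml", ".yml", ".toml", ".ini", ".cfg", ".conf", ".csv", ".tsv",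
--     ".log", ".sql", ".xml", ".html", ".css", ".js", ".ts", ".java", ".c", ".cpp", ".h", ".hpp", ".cs",
--     ".go", ".rs", ".php", ".rb", ".sh", ".ps1", ".bat", ".env", ".properties", ".lua", ".kt", ".swift",
-- }
--
-- ARCHIVE_EXTENSIONS = {".zip", ".rar", ".7z", ".tar", ".gz", ".bz2", ".xz", ".tgz", ".tar.gz", ".tar.bz2", ".tar.xz"}
--
-- def _classify_attachment_py(filename: str) -> str:
--     normalized = (filename or "").strip().replace("\\", "/").rsplit("/", maxsplit=1)[-1].casefold()
--     if any(normalized.endswith(ext) for ext in IMAGE_EXTENSIONS):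
--         return "image"
--     if any(normalized.endswith(ext) for ext in VIDEO_EXTENSIONS):
--         return "video"
--     if any(normalized.endswith(ext) for ext in AUDIO_EXTENSIONS):
--         return "audio"
--     if any(normalized.endswith(ext) for ext in TEXT_EXTENSIONS):
--         return "text"
--     if any(normalized.endswith(ext) for ext in ARCHIVE_EXTENSIONS):
--         return "archive"
--     return "unknown"
-- ===== SOURCE B (Python) =====
-- # Map from a filename's final (last-dot) extension to its media category.
-- # The multi-part archive suffixes of the original (".tar.gz", ".tar.bz2", ".tar.xz")
-- # need no entries: their final suffixes ".gz"/".bz2"/".xz" are archive entries already.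
-- _EXT_TO_TYPE = {
--     ".png": "image", ".jpg": "image", ".jpeg": "image", ".webp": "image", ".gif": "image", ".bmp": "image",
--     ".mp4": "video", ".mov": "video", ".mkv": "video", ".webm": "video", ".avi": "video", ".m4v": "video",
--     ".mp3": "audio", ".wav": "audio", ".ogg": "audio", ".flac": "audio", ".m4a": "audio", ".aac": "audio",
--     ".txt": "text", ".md": "text", ".py": "text", ".json": "text", ".yaml": "text", ".yml": "text",
--     ".toml": "text", ".ini": "text", ".cfg": "text", ".conf": "text", ".csv": "text", ".tsv": "text",
--     ".log": "text", ".sql": "text", ".xml": "text", ".html": "text", ".css": "text", ".js": "text",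
--     ".ts": "text", ".java": "text", ".c": "text", ".cpp": "text", ".h": "text", ".hpp": "text",
--     ".cs": "text", ".go": "text", ".rs": "text", ".php": "text", ".rb": "text", ".sh": "text",
--     ".ps1": "text", ".bat": "text", ".env": "text", ".properties": "text", ".lua": "text", ".kt": "text",
--     ".swift": "text",
--     ".zip": "archive", ".rar": "archive", ".7z": "archive", ".tar": "archive", ".gz": "archive",
--     ".bz2": "archive", ".xz": "archive", ".tgz": "archive",
-- }
--
--
-- def _classify_attachment_py(filename: str) -> str:
--     normalized = (filename or "").strip().replace("\\", "/").rsplit("/", maxsplit=1)[-1].casefold()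
--     # single pass: keep the suffix that starts at the last '.'
--     ext = ""
--     for ch in normalized:
--         if ch == ".":
--             ext = "."
--         elif ext:
--             ext += ch
--     return _EXT_TO_TYPE.get(ext, "unknown")
-- ===== Notes on version B (the rewrite author's own statement) =====
-- stated objective: idiomatic
-- what changed: Replaces A's five any(endswith) scans over extension sets by a single left-to-right pass that extracts the suffix starting at the last dot and one lookup in a precomputed extension-to-category dict (multi-part archive suffixes like .tar.gz are covered by their final suffix .gz already in the dict).
import Mathlib
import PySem

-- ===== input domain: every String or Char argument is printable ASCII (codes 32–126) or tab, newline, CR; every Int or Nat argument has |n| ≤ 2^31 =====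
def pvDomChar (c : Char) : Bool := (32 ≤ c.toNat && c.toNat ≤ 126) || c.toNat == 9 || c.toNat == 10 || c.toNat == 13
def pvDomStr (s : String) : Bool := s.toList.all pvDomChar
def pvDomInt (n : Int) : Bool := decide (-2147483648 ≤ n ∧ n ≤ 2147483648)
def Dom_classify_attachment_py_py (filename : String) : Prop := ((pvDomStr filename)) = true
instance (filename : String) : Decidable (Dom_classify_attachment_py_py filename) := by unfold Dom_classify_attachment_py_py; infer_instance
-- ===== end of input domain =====

set_option maxRecDepth 4096


-- B replaces A's five endswith-scans over extension sets by one pass that extracts the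
-- last-dot suffix and a single dict lookup (objective: idiomatic/alternative, same cost).

-- ===== PORT A =====
-- Python sets ported as lists of their (distinct) elements; A only folds `any` over them,
-- so iteration order is irrelevant to the result.
def IMAGE_EXTENSIONS : List (List Char) :=
  [".png".toList, ".jpg".toList, ".jpeg".toList, ".webp".toList, ".gif".toList, ".bmp".toList]
def VIDEO_EXTENSIONS : List (List Char) :=
  [".mp4".toList, ".mov".toList, ".mkv".toList, ".webm".toList, ".avi".toList, ".m4v".toList]
def AUDIO_EXTENSIONS : List (List Char) :=
  [".mp3".toList, ".wav".toList, ".ogg".toList, ".flac".toList, ".m4a".toList, ".aac".toList]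
def TEXT_EXTENSIONS : List (List Char) :=
  [".txt".toList, ".md".toList, ".py".toList, ".json".toList, ".yaml".toList, ".yml".toList,
   ".toml".toList, ".ini".toList, ".cfg".toList, ".conf".toList, ".csv".toList, ".tsv".toList,
   ".log".toList, ".sql".toList, ".xml".toList, ".html".toList, ".css".toList, ".js".toList,
   ".ts".toList, ".java".toList, ".c".toList, ".cpp".toList, ".h".toList, ".hpp".toList,
   ".cs".toList, ".go".toList, ".rs".toList, ".php".toList, ".rb".toList, ".sh".toList,
   ".ps1".toList, ".bat".toList, ".env".toList, ".properties".toList, ".lua".toList,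
   ".kt".toList, ".swift".toList]
def ARCHIVE_EXTENSIONS : List (List Char) :=
  [".zip".toList, ".rar".toList, ".7z".toList, ".tar".toList, ".gz".toList,
   ".bz2".toList, ".xz".toList, ".tgz".toList, ".tar.gz".toList, ".tar.bz2".toList, ".tar.xz".toList]

-- hand port of `s.rsplit("/", maxsplit=1)[-1]`: the segment after the last '/' (exact,
-- including "" after a trailing '/')
def pvLastSlashSeg (cs : List Char) : List Char :=
  cs.foldl (fun acc c => if c = '/' then [] else acc ++ [c]) []

-- the normalization line both Pythons share verbatim; `filename or ""` is `filename`
-- (the only falsy str IS ""); casefold = lower on the ASCII domain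
def pvNormalize (filename : String) : List Char :=
  PySem.Chars.lower (pvLastSlashSeg
    (PySem.Chars.replace (PySem.Chars.strip filename.toList) "\\".toList "/".toList))

def classify_attachment_py_py (filename : String) : String :=
  let normalized := pvNormalize filename
  if IMAGE_EXTENSIONS.any (fun e => PySem.Chars.endswith normalized e) then "image"
  else if VIDEO_EXTENSIONS.any (fun e => PySem.Chars.endswith normalized e) then "video"
  else if AUDIO_EXTENSIONS.any (fun e => PySem.Chars.endswith normalized e) then "audio"
  else if TEXT_EXTENSIONS.any (fun e => PySem.Chars.endswith normalized e) then "text"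
  else if ARCHIVE_EXTENSIONS.any (fun e => PySem.Chars.endswith normalized e) then "archive"
  else "unknown"

-- ===== PORT B =====
def EXT_TO_TYPE : PySem.Dict (List Char) String := PySem.Dict.ofList
  [(".png".toList, "image"), (".jpg".toList, "image"), (".jpeg".toList, "image"),
   (".webp".toList, "image"), (".gif".toList, "image"), (".bmp".toList, "image"),
   (".mp4".toList, "video"), (".mov".toList, "video"), (".mkv".toList, "video"),
   (".webm".toList, "video"), (".avi".toList, "video"), (".m4v".toList, "video"),
   (".mp3".toList, "audio"), (".wav".toList, "audio"), (".ogg".toList, "audio"),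
   (".flac".toList, "audio"), (".m4a".toList, "audio"), (".aac".toList, "audio"),
   (".txt".toList, "text"), (".md".toList, "text"), (".py".toList, "text"),
   (".json".toList, "text"), (".yaml".toList, "text"), (".yml".toList, "text"),
   (".toml".toList, "text"), (".ini".toList, "text"), (".cfg".toList, "text"),
   (".conf".toList, "text"), (".csv".toList, "text"), (".tsv".toList, "text"),
   (".log".toList, "text"), (".sql".toList, "text"), (".xml".toList, "text"),
   (".html".toList, "text"), (".css".toList, "text"), (".js".toList, "text"),
   (".ts".toList, "text"), (".java".toList, "text"), (".c".toList, "text"),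
   (".cpp".toList, "text"), (".h".toList, "text"), (".hpp".toList, "text"),
   (".cs".toList, "text"), (".go".toList, "text"), (".rs".toList, "text"),
   (".php".toList, "text"), (".rb".toList, "text"), (".sh".toList, "text"),
   (".ps1".toList, "text"), (".bat".toList, "text"), (".env".toList, "text"),
   (".properties".toList, "text"), (".lua".toList, "text"), (".kt".toList, "text"),
   (".swift".toList, "text"),
   (".zip".toList, "archive"), (".rar".toList, "archive"), (".7z".toList, "archive"),
   (".tar".toList, "archive"), (".gz".toList, "archive"), (".bz2".toList, "archive"),
   (".xz".toList, "archive"), (".tgz".toList, "archive")]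

-- the loop body of B's single pass: reset at '.', append once an extension has started
def pvExtStep (acc : List Char) (c : Char) : List Char :=
  if c = '.' then ['.'] else if acc = [] then acc else acc ++ [c]

def classify_attachment_py_py_alt (filename : String) : String :=
  let normalized := pvNormalize filename
  let ext := normalized.foldl pvExtStep []
  EXT_TO_TYPE.getD ext "unknown"

-- ===== PRECONDITION & SPEC =====
def Spec_classify_attachment_py_py (filename : String) (out : String) : Prop := out = classify_attachment_py_py_alt filename
instance (filename : String) (out : String) : Decidable (Spec_classify_attachment_py_py filename out) := by unfold Spec_classify_attachment_py_py; infer_instance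

-- ===== CLAIM (what is proved, stated in full; the proofs are below) =====
def Claim_equal_classify_attachment_py_py : Prop := ∀ (filename : String), Dom_classify_attachment_py_py filename → Spec_classify_attachment_py_py filename (classify_attachment_py_py filename)

-- ===== LEMMAS AND PROOFS =====

-- the single-dot archive suffixes: every multi-part one (".tar.gz" …) ends with one of these
def pvArchSingles : List (List Char) :=
  [".zip".toList, ".rar".toList, ".7z".toList, ".tar".toList, ".gz".toList,
   ".bz2".toList, ".xz".toList, ".tgz".toList]

-- after an extension has started, a dot-free tail is just appended
lemma pv_foldl_no_dot (tail : List Char) : ∀ acc : List Char, acc ≠ [] →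
    (∀ c ∈ tail, c ≠ '.') → tail.foldl pvExtStep acc = acc ++ tail := by
  induction tail with
  | nil => intro acc _ _; simp
  | cons c t ih =>
    intro acc hacc hnd
    have hc : c ≠ '.' := hnd c (by simp)
    have : pvExtStep acc c = acc ++ [c] := by
      simp [pvExtStep, hc, hacc]
    rw [List.foldl_cons, this, ih (acc ++ [c]) (by simp) (fun d hd => hnd d (by simp [hd]))]
    simp

-- B's extracted extension is a suffix of the scanned string
lemma pv_ext_suffix (cs : List Char) : cs.foldl pvExtStep [] <:+ cs := by
  induction cs using List.reverseRecOn with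
  | nil => simp
  | append_singleton t c ih =>
    rw [List.foldl_append]
    simp only [List.foldl_cons, List.foldl_nil]
    by_cases hc : c = '.'
    · exact ⟨t, by simp [pvExtStep, hc]⟩
    · by_cases he : t.foldl pvExtStep [] = []
      · simp [pvExtStep, hc, he]
      · obtain ⟨p, hp⟩ := ih
        have hstep : pvExtStep (t.foldl pvExtStep []) c = t.foldl pvExtStep [] ++ [c] := by
          simp [pvExtStep, hc, he]
        exact ⟨p, by rw [hstep, ← List.append_assoc, hp]⟩

-- for a single-dot extension e, `normalized.endswith(e)` is `ext == e`
lemma pv_endswith_iff_ext (cs e : List Char) (he : e.head? = some '.')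
    (ht : ∀ c ∈ e.tail, c ≠ '.') :
    PySem.Chars.endswith cs e = decide (cs.foldl pvExtStep [] = e) := by
  obtain ⟨r, rfl⟩ : ∃ r, e = '.' :: r := by
    cases e with
    | nil => simp at he
    | cons a r => simp at he; exact ⟨r, by simp [he]⟩
  simp only [List.tail_cons] at ht
  rw [Bool.eq_iff_iff, PySem.Chars.endswith_iff, decide_eq_true_iff]
  constructor
  · rintro ⟨t, rfl⟩
    rw [List.foldl_append, List.foldl_cons]
    have h1 : pvExtStep (t.foldl pvExtStep []) '.' = ['.'] := by simp [pvExtStep]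
    rw [h1, pv_foldl_no_dot r ['.'] (by simp) ht]
    simp
  · intro h
    exact h ▸ pv_ext_suffix cs

-- `any(endswith e)` over a group of single-dot extensions is membership of the extracted extension
lemma pv_any_single (g : List (List Char))
    (h : ∀ e ∈ g, e.head? = some '.' ∧ ∀ c ∈ e.tail, c ≠ '.') (cs : List Char) :
    g.any (fun e => PySem.Chars.endswith cs e) = decide (cs.foldl pvExtStep [] ∈ g) := by
  induction g with
  | nil => simp
  | cons e g ih =>
    obtain ⟨he, ht⟩ := h e (by simp)
    rw [List.any_cons, pv_endswith_iff_ext cs e he ht,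
        ih (fun e' he' => h e' (by simp [he']))]
    simp [List.mem_cons, eq_comm]

-- the archive `any` (which also holds multi-part suffixes) is membership in the single-dot ones
lemma pv_any_archive (cs : List Char) :
    ARCHIVE_EXTENSIONS.any (fun e => PySem.Chars.endswith cs e)
      = decide (cs.foldl pvExtStep [] ∈ pvArchSingles) := by
  have hsplit : ARCHIVE_EXTENSIONS
      = pvArchSingles ++ [".tar.gz".toList, ".tar.bz2".toList, ".tar.xz".toList] := rfl
  rw [hsplit, List.any_append, pv_any_single pvArchSingles (by simp [pvArchSingles]) cs]
  have hmulti : ([".tar.gz".toList, ".tar.bz2".toList, ".tar.xz".toList].any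
      (fun e => PySem.Chars.endswith cs e)) = true → cs.foldl pvExtStep [] ∈ pvArchSingles := by
    intro h
    simp only [List.any_cons, List.any_nil, Bool.or_false, Bool.or_eq_true] at h
    rcases h with h | h | h
    · have hgz : ".gz".toList <:+ cs :=
        List.IsSuffix.trans (⟨".tar".toList, rfl⟩) ((PySem.Chars.endswith_iff _ _).mp h)
      have : cs.foldl pvExtStep [] = ".gz".toList := by
        have := pv_endswith_iff_ext cs ".gz".toList (by decide) (by simp)
        rw [Bool.eq_iff_iff, PySem.Chars.endswith_iff, decide_eq_true_iff] at this
        exact this.mp hgz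
      simp [this, pvArchSingles]
    · have hgz : ".bz2".toList <:+ cs :=
        List.IsSuffix.trans (⟨".tar".toList, rfl⟩) ((PySem.Chars.endswith_iff _ _).mp h)
      have : cs.foldl pvExtStep [] = ".bz2".toList := by
        have := pv_endswith_iff_ext cs ".bz2".toList (by decide) (by simp)
        rw [Bool.eq_iff_iff, PySem.Chars.endswith_iff, decide_eq_true_iff] at this
        exact this.mp hgz
      simp [this, pvArchSingles]
    · have hgz : ".xz".toList <:+ cs :=
        List.IsSuffix.trans (⟨".tar".toList, rfl⟩) ((PySem.Chars.endswith_iff _ _).mp h)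
      have : cs.foldl pvExtStep [] = ".xz".toList := by
        have := pv_endswith_iff_ext cs ".xz".toList (by decide) (by simp)
        rw [Bool.eq_iff_iff, PySem.Chars.endswith_iff, decide_eq_true_iff] at this
        exact this.mp hgz
      simp [this, pvArchSingles]
  cases hm : ([".tar.gz".toList, ".tar.bz2".toList, ".tar.xz".toList].any
      (fun e => PySem.Chars.endswith cs e)) with
  | false => simp
  | true => simp [hmulti hm]

-- first-match lookup in a block of keys that all map to v, then the rest
lemma pv_getD_group (ks : List (List Char)) (v d : String)
    (rest : List ((List Char) × String)) (x : List Char) :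
    (PySem.Dict.mk ((ks.map fun k => (k, v)) ++ rest)).getD x d
      = if x ∈ ks then v else (PySem.Dict.mk rest).getD x d := by
  induction ks with
  | nil => simp
  | cons k ks ih =>
    by_cases hk : k = x
    · simp [PySem.Dict.getD, PySem.Dict.get?, hk]
    · have hne : (k == x) = false := by simp [hk]
      simp only [List.map_cons, List.cons_append]
      simp only [PySem.Dict.getD, PySem.Dict.get?, List.find?, hne] at ih ⊢
      rw [ih]
      simp [List.mem_cons, Ne.symm hk]

-- ===== VERDICT (by name: the statement is the Claim_ definition above) =====
theorem classify_attachment_py_py_spec : Claim_equal_classify_attachment_py_py := by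
  intro filename _
  unfold Spec_classify_attachment_py_py
  simp only [classify_attachment_py_py, classify_attachment_py_py_alt]
  generalize pvNormalize filename = cs
  have hdict : EXT_TO_TYPE = PySem.Dict.mk
      ((IMAGE_EXTENSIONS.map fun k => (k, "image")) ++
        ((VIDEO_EXTENSIONS.map fun k => (k, "video")) ++
          ((AUDIO_EXTENSIONS.map fun k => (k, "audio")) ++
            ((TEXT_EXTENSIONS.map fun k => (k, "text")) ++
              ((pvArchSingles.map fun k => (k, "archive")) ++ []))))) := by rfl
  rw [pv_any_single IMAGE_EXTENSIONS (by simp [IMAGE_EXTENSIONS]) cs,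
      pv_any_single VIDEO_EXTENSIONS (by simp [VIDEO_EXTENSIONS]) cs,
      pv_any_single AUDIO_EXTENSIONS (by simp [AUDIO_EXTENSIONS]) cs,
      pv_any_single TEXT_EXTENSIONS (by simp [TEXT_EXTENSIONS]) cs,
      pv_any_archive cs, hdict,
      pv_getD_group, pv_getD_group, pv_getD_group, pv_getD_group, pv_getD_group]
  simp only [decide_eq_true_eq]
  split_ifs <;> simp [PySem.Dict.getD, PySem.Dict.get?]
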